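-- pv_equiv track=rewrite | github.com/Sergey-Misyura/Solved-Algorithms | Yandex Algorithms Trainings/5.0/Lesson_4_(Binary_search)/H - Elections.py | get_count_votes
-- ===== SOURCE A (Python) =====
-- def get_count_votes(cur_idx, voters, suffix_sum, level):
--     """
--     Функция подсчета получаемых голосов при срезе
--     :param cur_idx: партия для которой считаем получаемые голоса
--     :param voters: массив голосующих
--     :param suffix_sum: массив суффиксных сумм
--     :param level: уровень среза голосов
--     :return: получаемые при срезе голоса
--     """
--     lf, rg = 0, len(voters) - 1  # границы бин поиска
--     # находим партию самую близкую к level, для подсчета голосов от нее и вправо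
--     while lf < rg:
--         mid = (lf + rg) // 2  # индекс текущей партии для бин поиска
--         if voters[mid][0] < level:
--             lf = mid + 1
--         else:
--             rg = mid
--     if voters[lf][0] < level:  # если level слишком большой - возвращаем 0
--         return 0
--     count_votes = suffix_sum[lf] - level * (len(voters) - lf)  # подсчитываем получаемые голоса исходя из партии lf
--     if voters[cur_idx][0] >= level:  # если партия для которой считаем >= level, убираем срезанные с нее голоса
--         count_votes -= (voters[cur_idx][0] - level)
--     # возвращаем получаемые при срезе голоса
--     return count_votes
-- ===== SOURCE B (Python) =====
-- def get_count_votes(cur_idx, voters, suffix_sum, level):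
--     """Same counting, but lf is found by one left-to-right scan instead of binary search."""
--     lf = None
--     for i, v in enumerate(voters):
--         if v[0] >= level:
--             lf = i
--             break
--     if lf is None:  # nobody reaches the cut level
--         return 0
--     count_votes = suffix_sum[lf] - level * (len(voters) - lf)
--     if voters[cur_idx][0] >= level:
--         count_votes -= voters[cur_idx][0] - level
--     return count_votes
-- ===== Notes on version B (the rewrite author's own statement) =====
-- stated objective: simpler
-- what changed: Replaces A's binary-search interval narrowing by a single left-to-right scan for the first party at or above the cut level (returning 0 if none), keeping A's suffix-sum formula unchanged.
-- outside the precondition, e.g. on get_count_votes(0, [(5, 0), (0, 0), (7, 0)], [12, 7, 7], 1): A returns 2, B returns 5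
import Mathlib
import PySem

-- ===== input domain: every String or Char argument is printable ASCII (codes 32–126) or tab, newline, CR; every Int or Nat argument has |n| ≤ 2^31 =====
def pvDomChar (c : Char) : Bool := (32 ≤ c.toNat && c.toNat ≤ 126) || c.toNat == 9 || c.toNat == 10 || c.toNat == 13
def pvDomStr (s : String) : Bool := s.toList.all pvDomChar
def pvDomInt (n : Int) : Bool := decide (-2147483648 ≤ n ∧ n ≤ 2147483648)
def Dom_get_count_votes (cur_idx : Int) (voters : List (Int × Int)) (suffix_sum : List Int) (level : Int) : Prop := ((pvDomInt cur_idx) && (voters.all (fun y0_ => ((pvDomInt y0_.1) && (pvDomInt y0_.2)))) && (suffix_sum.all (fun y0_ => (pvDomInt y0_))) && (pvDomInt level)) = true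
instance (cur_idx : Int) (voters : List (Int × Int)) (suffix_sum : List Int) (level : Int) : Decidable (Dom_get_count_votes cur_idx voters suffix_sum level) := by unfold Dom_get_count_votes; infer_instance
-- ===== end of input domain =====

-- B replaces A's binary search for the cut index by a single linear scan (simpler); same formula otherwise.

-- ===== PORT A =====
-- the 'while lf < rg' binary-search loop of A, returning the final lf.
-- Fuel (rg - lf).toNat only makes the loop total: each iteration shrinks rg - lf by at least 1,
-- so the 'fuel exhausted' arm coincides with the loop's own exit (¬ lf < rg).
def gcvLoopF (voters : List (Int × Int)) (level : Int) : Nat → Int → Int → Int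
  | 0, lf, _ => lf
  | n + 1, lf, rg =>
    if lf < rg then
      let mid := PySem.Int.floordiv (lf + rg) 2
      match PySem.List.pyGet? voters mid with
      | none => lf  -- Python raises IndexError here; unreachable under Pre_
      | some v =>
        if v.1 < level then gcvLoopF voters level n (mid + 1) rg
        else gcvLoopF voters level n lf mid
    else lf

def gcvLoop (voters : List (Int × Int)) (level : Int) (lf rg : Int) : Int :=
  gcvLoopF voters level (rg - lf).toNat lf rg

def get_count_votes (cur_idx : Int) (voters : List (Int × Int)) (suffix_sum : List Int) (level : Int) : Int :=
  let lf := gcvLoop voters level 0 ((voters.length : Int) - 1)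
  match PySem.List.pyGet? voters lf with
  | none => 0  -- Python raises IndexError; unreachable under Pre_
  | some vlf =>
    if vlf.1 < level then 0
    else
      let count_votes := (PySem.List.pyGet? suffix_sum lf).getD 0 - level * ((voters.length : Int) - lf)
      match PySem.List.pyGet? voters cur_idx with
      | none => 0  -- Python raises IndexError; unreachable under Pre_
      | some vc =>
        if level ≤ vc.1 then count_votes - (vc.1 - level) else count_votes

-- ===== PORT B =====
def get_count_votes_alt (cur_idx : Int) (voters : List (Int × Int)) (suffix_sum : List Int) (level : Int) : Int :=
  match voters.findIdx? (fun v => level ≤ v.1) with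
  | none => 0
  | some lf =>
    let count_votes := (PySem.List.pyGet? suffix_sum (lf : Int)).getD 0 - level * ((voters.length : Int) - (lf : Int))
    match PySem.List.pyGet? voters cur_idx with
    | none => 0  -- Python raises IndexError; unreachable under Pre_
    | some vc =>
      if level ≤ vc.1 then count_votes - (vc.1 - level) else count_votes

-- ===== PRECONDITION & SPEC =====
-- Pre_ excludes: empty voters (A raises IndexError); voters on which the cut predicate
-- 'level ≤ first component' is not monotone left-to-right — the property binary search needs,
-- guaranteed by the sorted voters the function is written for; on other input A's returned
-- index is accidental (see the cite in claim.json). When some party reaches the level it also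
-- requires cur_idx in Python index range and suffix_sum at least as long as voters (else A
-- raises IndexError).
def Pre_get_count_votes (cur_idx : Int) (voters : List (Int × Int)) (suffix_sum : List Int) (level : Int) : Prop :=
  voters ≠ [] ∧ voters.Pairwise (fun a b => level ≤ a.1 → level ≤ b.1) ∧
  ((∃ v ∈ voters, level ≤ v.1) →
    (PySem.Raise.InRange voters.length cur_idx ∧ voters.length ≤ suffix_sum.length))
instance (cur_idx : Int) (voters : List (Int × Int)) (suffix_sum : List Int) (level : Int) : Decidable (Pre_get_count_votes cur_idx voters suffix_sum level) := by unfold Pre_get_count_votes; infer_instance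

def pvWitness_get_count_votes : Int × (List (Int × Int)) × List Int × Int :=
  (0, [(1, 1), (3, 2)], [4, 3], 2)

def Spec_get_count_votes (cur_idx : Int) (voters : List (Int × Int)) (suffix_sum : List Int) (level : Int) (out : Int) : Prop := out = get_count_votes_alt cur_idx voters suffix_sum level
instance (cur_idx : Int) (voters : List (Int × Int)) (suffix_sum : List Int) (level : Int) (out : Int) : Decidable (Spec_get_count_votes cur_idx voters suffix_sum level out) := by unfold Spec_get_count_votes; infer_instance

-- ===== CLAIM (what is proved, stated in full; the proofs are below) =====
def Claim_equal_get_count_votes : Prop := ∀ (cur_idx : Int) (voters : List (Int × Int)) (suffix_sum : List Int) (level : Int), Dom_get_count_votes cur_idx voters suffix_sum level → Pre_get_count_votes cur_idx voters suffix_sum level → Spec_get_count_votes cur_idx voters suffix_sum level (get_count_votes cur_idx voters suffix_sum level)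

-- ===== LEMMAS AND PROOFS =====

-- monotonicity of the cut predicate along voters (what the binary search relies on)
theorem gcv_cut_mono (voters : List (Int × Int)) (level : Int)
    (hs : voters.Pairwise (fun a b => level ≤ a.1 → level ≤ b.1)) :
    ∀ (i j : Nat) (hi : i < voters.length) (hj : j < voters.length), i ≤ j →
      level ≤ (voters[i]).1 → level ≤ (voters[j]).1 := by
  intro i j hi hj hij
  rcases Nat.lt_or_eq_of_le hij with h | h
  · exact List.pairwise_iff_getElem.mp hs i j hi hj h
  · subst h; exact id

-- invariant of A's binary-search loop, by its functional induction:
-- the result r lies in [lf, rg], everything in [lf, r) is below level,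
-- and either voters[r] is at/above level or r = rg.
theorem gcvLoopF_inv (voters : List (Int × Int)) (level : Int)
    (hs : voters.Pairwise (fun a b => level ≤ a.1 → level ≤ b.1)) :
    ∀ (n : Nat) (lf rg : Int), (rg - lf).toNat ≤ n → 0 ≤ lf → lf ≤ rg → rg < (voters.length : Int) →
      lf ≤ gcvLoopF voters level n lf rg ∧ gcvLoopF voters level n lf rg ≤ rg ∧
      (∀ j : Nat, lf ≤ (j : Int) → (j : Int) < gcvLoopF voters level n lf rg →
         ∀ x, voters[j]? = some x → x.1 < level) ∧
      ((∀ x, voters[(gcvLoopF voters level n lf rg).toNat]? = some x → level ≤ x.1)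
         ∨ gcvLoopF voters level n lf rg = rg) := by
  intro n
  induction n with
  | zero =>
      intro lf rg hfuel h0 h1 h2
      have hge : ¬ lf < rg := by omega
      simp only [gcvLoopF]
      exact ⟨le_refl _, h1, fun j hj1 hj2 => by omega, Or.inr (by omega)⟩
  | succ n ih =>
      intro lf rg hfuel h0 h1 h2
      by_cases hlt : lf < rg
      · have hmd : PySem.Int.floordiv (lf + rg) 2 = (lf + rg) / 2 :=
          PySem.Int.floordiv_eq_ediv_of_pos (by omega)
        have hmlt : PySem.Int.floordiv (lf + rg) 2 < rg := by omega
        have hm0 : 0 ≤ PySem.Int.floordiv (lf + rg) 2 := by omega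
        have hmlen : (PySem.Int.floordiv (lf + rg) 2).toNat < voters.length := by omega
        have hm : PySem.List.pyGet? voters (PySem.Int.floordiv (lf + rg) 2)
            = some (voters[(PySem.Int.floordiv (lf + rg) 2).toNat]'hmlen) :=
          PySem.List.pyGet?_eq_some_getElem voters (by omega) (by omega)
        have hred : gcvLoopF voters level (n + 1) lf rg
            = if (voters[(PySem.Int.floordiv (lf + rg) 2).toNat]'hmlen).1 < level then gcvLoopF voters level n ((PySem.Int.floordiv (lf + rg) 2) + 1) rg
              else gcvLoopF voters level n lf (PySem.Int.floordiv (lf + rg) 2) := by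
          simp only [gcvLoopF, if_pos hlt, hm]
        rw [hred]
        by_cases hv : (voters[(PySem.Int.floordiv (lf + rg) 2).toNat]'hmlen).1 < level
        · rw [if_pos hv]
          obtain ⟨ih1, ih2, ih3, ih4⟩ := ih ((PySem.Int.floordiv (lf + rg) 2) + 1) rg (by omega) (by omega) (by omega) h2
          refine ⟨by omega, ih2, ?_, ih4⟩
          intro j hj1 hj2 x hx
          by_cases hc : (PySem.Int.floordiv (lf + rg) 2) + 1 ≤ (j : Int)
          · exact ih3 j hc hj2 x hx
          · -- j ≤ mid : sortedness against voters[mid], which is below level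
            have hjlen : j < voters.length := (List.getElem?_eq_some_iff.mp hx).1
            have hxeq : x = voters[j]'hjlen := (List.getElem?_eq_some_iff.mp hx).2.symm
            have hmono := gcv_cut_mono voters level hs j
              (PySem.Int.floordiv (lf + rg) 2).toNat hjlen hmlen (by omega)
            rw [hxeq]
            by_cases hjl : level ≤ (voters[j]'hjlen).1
            · exact absurd (hmono hjl) (by omega)
            · omega
        · rw [if_neg hv]
          obtain ⟨ih1, ih2, ih3, ih4⟩ := ih lf (PySem.Int.floordiv (lf + rg) 2) (by omega) h0 (by omega) (by omega)
          refine ⟨ih1, by omega, ih3, ?_⟩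
          rcases ih4 with h | h
          · exact Or.inl h
          · left
            intro x hx
            rw [h] at hx
            have hsome : voters[(PySem.Int.floordiv (lf + rg) 2).toNat]? = some (voters[(PySem.Int.floordiv (lf + rg) 2).toNat]'hmlen) :=
              List.getElem?_eq_some_iff.mpr ⟨hmlen, rfl⟩
            rw [hsome] at hx
            cases hx
            omega
      · simp only [gcvLoopF, if_neg hlt]
        exact ⟨le_refl _, h1, fun j hj1 hj2 => by omega, Or.inr (by omega)⟩

theorem gcvLoop_inv (voters : List (Int × Int)) (level : Int)
    (hs : voters.Pairwise (fun a b => level ≤ a.1 → level ≤ b.1)) :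
    ∀ lf rg : Int, 0 ≤ lf → lf ≤ rg → rg < (voters.length : Int) →
      lf ≤ gcvLoop voters level lf rg ∧ gcvLoop voters level lf rg ≤ rg ∧
      (∀ j : Nat, lf ≤ (j : Int) → (j : Int) < gcvLoop voters level lf rg →
         ∀ x, voters[j]? = some x → x.1 < level) ∧
      ((∀ x, voters[(gcvLoop voters level lf rg).toNat]? = some x → level ≤ x.1)
         ∨ gcvLoop voters level lf rg = rg) := by
  intro lf rg h0 h1 h2
  exact gcvLoopF_inv voters level hs (rg - lf).toNat lf rg (le_refl _) h0 h1 h2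

-- link to B's scan: when findIdx? hits, A's loop lands on the same index;
-- when it misses, A's landing element is below level.
theorem gcvLoop_findIdx (voters : List (Int × Int)) (level : Int)
    (hne : voters ≠ []) (hs : voters.Pairwise (fun a b => level ≤ a.1 → level ≤ b.1)) :
    (∀ lf : Nat, voters.findIdx? (fun v => level ≤ v.1) = some lf →
        gcvLoop voters level 0 ((voters.length : Int) - 1) = (lf : Int)) ∧
    (voters.findIdx? (fun v => level ≤ v.1) = none →
        ∀ x, voters[(gcvLoop voters level 0 ((voters.length : Int) - 1)).toNat]? = some x →
          x.1 < level) := by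
  have hlen : 0 < voters.length := List.length_pos_iff.mpr hne
  obtain ⟨h1, h2, h3, h4⟩ := gcvLoop_inv voters level hs 0 ((voters.length : Int) - 1)
    (le_refl 0) (by omega) (by omega)
  set r := gcvLoop voters level 0 ((voters.length : Int) - 1) with hr
  have hrlen : r.toNat < voters.length := by omega
  have hrsome : voters[r.toNat]? = some (voters[r.toNat]'hrlen) :=
    List.getElem?_eq_some_iff.mpr ⟨hrlen, rfl⟩
  constructor
  · intro lf hfi
    obtain ⟨hlf, hp, hfirst⟩ := List.findIdx?_eq_some_iff_getElem.mp hfi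
    simp only [decide_eq_true_eq] at hp hfirst
    have hp' : level ≤ (voters[lf]'hlf).1 := hp
    have hA : ¬ ((lf : Int) < r) := by
      intro hlt
      have := h3 lf (by omega) hlt _ (List.getElem?_eq_some_iff.mpr ⟨hlf, rfl⟩)
      omega
    have hB : ¬ (r.toNat < lf) := by
      intro hlt
      have hnp : ¬ level ≤ (voters[r.toNat]'hrlen).1 := hfirst r.toNat hlt
      rcases h4 with h | h
      · exact hnp (h _ hrsome)
      · -- r = len - 1, so lf ≤ r.toNat, contradicting r.toNat < lf
        omega
    omega
  · intro hfi x hx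
    have hall := List.findIdx?_eq_none_iff.mp hfi
    have hmem : x ∈ voters := List.mem_of_getElem? hx
    have := hall x hmem
    simp only [decide_eq_false_iff_not] at this
    omega

-- ===== VERDICT (by name: the statement is the Claim_ definition above) =====
theorem get_count_votes_spec : Claim_equal_get_count_votes := by
  intro cur_idx voters suffix_sum level _hDom hPre
  obtain ⟨hne, hs, _hrest⟩ := hPre
  unfold Spec_get_count_votes get_count_votes get_count_votes_alt
  have hlen : 0 < voters.length := List.length_pos_iff.mpr hne
  obtain ⟨hA, hB⟩ := gcvLoop_findIdx voters level hne hs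
  obtain ⟨h1, h2, _h3, _h4⟩ := gcvLoop_inv voters level hs 0 ((voters.length : Int) - 1)
    (le_refl 0) (by omega) (by omega)
  cases hfi : voters.findIdx? (fun v => level ≤ v.1) with
  | none =>
      have hrlen : (gcvLoop voters level 0 ((voters.length : Int) - 1)).toNat < voters.length := by
        omega
      have hget : PySem.List.pyGet? voters (gcvLoop voters level 0 ((voters.length : Int) - 1))
          = some (voters[(gcvLoop voters level 0 ((voters.length : Int) - 1)).toNat]'hrlen) :=
        PySem.List.pyGet?_eq_some_getElem voters (by omega) (by omega)
      have hbel := hB hfi _ (List.getElem?_eq_some_iff.mpr ⟨hrlen, rfl⟩)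
      simp only [hget, if_pos hbel]
  | some lf0 =>
      have hr := hA lf0 hfi
      obtain ⟨hlf, hp, _⟩ := List.findIdx?_eq_some_iff_getElem.mp hfi
      simp only [decide_eq_true_eq] at hp
      have hget : PySem.List.pyGet? voters ((lf0 : Int)) = some (voters[lf0]'hlf) := by
        rw [PySem.List.pyGet?_natCast]; exact List.getElem?_eq_some_iff.mpr ⟨hlf, rfl⟩
      have hnotlt : ¬ ((voters[lf0]'hlf).1 < level) := not_lt.mpr hp
      simp only [hr, hget, if_neg hnotlt]
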